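-- pv_equiv track=rewrite | github.com/WangXinyan940/schrodinger-nnp-benchmark | sch_benchmark/tools.py | group_by_smiles
-- ===== SOURCE A (Python) =====
-- def group_by_smiles(smiles):
--     grp = {}
--     ngrp = []
--     for smi in smiles:
--         if smi not in grp:
--             grp[smi] = len(grp)
--         ngrp.append(grp[smi])
--     return ngrp
-- ===== SOURCE B (Python) =====
-- def group_by_smiles(smiles):
--     return [len(set(smiles[:smiles.index(s)])) for s in smiles]
-- ===== Notes on version B (the rewrite author's own statement) =====
-- stated objective: simpler
-- what changed: Replaces A's stateful loop that grows a first-seen index dict while appending with a per-element closed form: each element's group index is computed independently as the number of distinct smiles strictly before its first occurrence, via len(set(smiles[:smiles.index(s)])) -- no dict and no accumulated state.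
import Mathlib
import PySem

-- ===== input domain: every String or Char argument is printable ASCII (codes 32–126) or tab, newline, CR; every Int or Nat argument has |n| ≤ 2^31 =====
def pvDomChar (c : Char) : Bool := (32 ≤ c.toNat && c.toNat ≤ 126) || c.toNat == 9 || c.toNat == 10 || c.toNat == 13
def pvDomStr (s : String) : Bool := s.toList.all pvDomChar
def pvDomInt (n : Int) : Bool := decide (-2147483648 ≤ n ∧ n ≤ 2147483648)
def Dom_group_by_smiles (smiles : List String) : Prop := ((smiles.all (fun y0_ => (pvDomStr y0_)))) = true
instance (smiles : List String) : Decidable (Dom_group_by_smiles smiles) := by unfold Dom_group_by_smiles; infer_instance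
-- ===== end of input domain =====

-- B replaces A's stateful dict-accumulating loop with a per-element closed form: each element's
-- group index is the number of distinct smiles strictly before its first occurrence,
-- computed by slicing and set cardinality (simpler one-liner; O(n^2) vs A's O(n)).


-- ===== PORT A =====
-- one loop: grow grp (first-occurrence index dict) and append grp[smi] in the same pass
def group_by_smiles (smiles : List String) : List Int :=
  (smiles.foldl
    (fun (st : PySem.Dict String Int × List Int) smi =>
      let grp := if st.1.contains smi = false then st.1.insert smi (st.1.size : Int) else st.1
      (grp, st.2 ++ [grp.getD smi 0]))
    (PySem.Dict.empty, [])).2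

-- ===== PORT B =====
-- per-element closed form: len(set(smiles[:smiles.index(s)])).
-- smiles.index(s) never raises here (s is drawn from smiles), so the `none` branch is unreachable.
def group_by_smiles_alt (smiles : List String) : List Int :=
  smiles.map (fun s =>
    match PySem.List.index? smiles s with
    | some p => PySem.Set.len (PySem.Set.ofList (PySem.List.slice smiles none (some (p : Int))))
    | none => 0)

-- ===== PRECONDITION & SPEC =====
def Spec_group_by_smiles (smiles : List String) (out : List Int) : Prop := out = group_by_smiles_alt smiles
instance (smiles : List String) (out : List Int) : Decidable (Spec_group_by_smiles smiles out) := by unfold Spec_group_by_smiles; infer_instance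

-- ===== CLAIM (what is proved, stated in full; the proofs are below) =====
def Claim_equal_group_by_smiles : Prop := ∀ (smiles : List String), Dom_group_by_smiles smiles → Spec_group_by_smiles smiles (group_by_smiles smiles)

-- ===== LEMMAS AND PROOFS =====

-- index dict of a list of distinct keys (A's grp after processing a prefix whose distinct elements are us)
def idxDict (us : List String) : PySem.Dict String Int :=
  (PySem.List.enumerate us).foldl (fun d p => d.insert p.2 p.1) PySem.Dict.empty

-- A's loop body, named so the invariant can be stated about it (defeq to the lambda in the port)
def stepA (st : PySem.Dict String Int × List Int) (smi : String) : PySem.Dict String Int × List Int :=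
  let grp := if st.1.contains smi = false then st.1.insert smi (st.1.size : Int) else st.1
  (grp, st.2 ++ [grp.getD smi 0])

theorem groupA_eq (smiles : List String) :
    group_by_smiles smiles = (smiles.foldl stepA (PySem.Dict.empty, [])).2 := rfl

theorem enumerate_append_singleton (xs : List String) (x : String) (n : Int) :
    PySem.List.enumerate (xs ++ [x]) n = PySem.List.enumerate xs n ++ [((n + xs.length : Int), x)] := by
  induction xs generalizing n with
  | nil => simp [PySem.List.enumerate_cons, PySem.List.enumerate_nil]
  | cons y ys ih =>
      simp [PySem.List.enumerate_cons, ih (n + 1)]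
      ring_nf

theorem idxDict_append (us : List String) (x : String) :
    idxDict (us ++ [x]) = (idxDict us).insert x (us.length : Int) := by
  simp [idxDict, enumerate_append_singleton]

theorem keys_idxDict (us : List String) :
    (idxDict us).keys = PySem.Set.ofList us := by
  unfold idxDict
  rw [PySem.Dict.keys_foldl_insert_key ((PySem.List.enumerate us)) (·.2) (fun _ p => p.1)]
  simp [PySem.List.map_snd_enumerate, PySem.Set.update_nil_left]

theorem contains_idxDict (us : List String) (s : String) :
    (idxDict us).contains s = decide (s ∈ us) := by
  rw [PySem.Dict.contains_eq_decide_mem_keys, keys_idxDict]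
  simp [PySem.Set.mem_ofList]

theorem size_idxDict (us : List String) (h : us.Nodup) :
    (idxDict us).size = us.length := by
  have h2 : (idxDict us).size = (idxDict us).keys.length := by
    simp [PySem.Dict.size, PySem.Dict.keys]
  rw [h2, keys_idxDict, PySem.Set.ofList_eq_self_of_nodup us h]

theorem getD_idxDict_append (t us : List String) (s : String)
    (hne : ∀ x ∈ t, x ≠ s) :
    (idxDict (us ++ t)).getD s 0 = (idxDict us).getD s 0 := by
  induction t using List.reverseRecOn with
  | nil => simp
  | append_singleton t x ih =>
      rw [← List.append_assoc, idxDict_append,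
        PySem.Dict.getD_insert_of_ne _ _ _ (Ne.symm (hne x (by simp)))]
      exact ih (fun y hy => hne y (by simp [hy]))

theorem getD_idxDict_update (l us : List String) (s : String)
    (hs : s ∈ us) :
    (idxDict (PySem.Set.update us l)).getD s 0 = (idxDict us).getD s 0 := by
  rw [PySem.Set.update_eq_append_filter]
  apply getD_idxDict_append
  intro x hx
  have hxc := (List.mem_filter.mp hx).2
  intro hxs
  subst hxs
  simp [PySem.Set.contains_eq_listContains] at hxc
  exact hxc hs

theorem stepA_mem (st : PySem.Dict String Int × List Int) (s : String)
    (h : st.1.contains s = true) :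
    stepA st s = (st.1, st.2 ++ [st.1.getD s 0]) := by
  simp [stepA, h]

theorem stepA_not_mem (st : PySem.Dict String Int × List Int) (s : String)
    (h : st.1.contains s = false) :
    stepA st s = (st.1.insert s (st.1.size : Int),
      st.2 ++ [(st.1.insert s (st.1.size : Int)).getD s 0]) := by
  simp [stepA, h]

theorem loopA_inv (l : List String) : ∀ (us : List String) (acc : List Int), us.Nodup →
    l.foldl stepA (idxDict us, acc)
    = (idxDict (PySem.Set.update us l),
       acc ++ l.map (fun s => (idxDict (PySem.Set.update us l)).getD s 0)) := by
  induction l with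
  | nil => intro us acc _; simp [PySem.Set.update_nil]
  | cons s l ih =>
      intro us acc hn
      rw [List.foldl_cons]
      by_cases hs : s ∈ us
      · have hc : (idxDict us).contains s = true := by simp [contains_idxDict, hs]
        have hupd : PySem.Set.update us (s :: l) = PySem.Set.update us l := by
          rw [PySem.Set.update_cons, PySem.Set.add_of_mem hs]
        rw [stepA_mem _ _ hc, ih us _ hn, hupd]
        simp [getD_idxDict_update l us s hs]
      · have hc : (idxDict us).contains s = false := by simp [contains_idxDict, hs]
        have hn' : (us ++ [s]).Nodup :=
          List.Nodup.append hn (List.nodup_singleton s) (List.disjoint_singleton.mpr hs)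
        have hupd : PySem.Set.update us (s :: l) = PySem.Set.update (us ++ [s]) l := by
          rw [PySem.Set.update_cons, PySem.Set.add_of_not_mem hs]
        rw [stepA_not_mem _ _ hc]
        simp only [size_idxDict us hn, ← idxDict_append us s]
        rw [ih (us ++ [s]) _ hn', hupd]
        simp [getD_idxDict_update l (us ++ [s]) s (by simp)]

-- the bridge: A's first-occurrence index of s in zs equals the number of distinct
-- elements of zs strictly before s's first occurrence (B's closed form)
theorem getD_idxDict_ofList (zs : List String) (s : String) (p : Nat)
    (hp : PySem.List.index? zs s = some p) :
    (idxDict (PySem.Set.ofList zs)).getD s 0 = ((PySem.Set.ofList (zs.take p)).length : Int) := by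
  induction zs using List.reverseRecOn generalizing p with
  | nil => simp [PySem.List.index?] at hp
  | append_singleton zs y ih =>
      by_cases hs : s ∈ zs
      · rw [PySem.List.index?_append_of_mem [y] hs] at hp
        have hple : p ≤ zs.length := by
          obtain ⟨pre, suf, hzs, hlen, -⟩ := (PySem.List.index?_eq_some_iff zs s p).mp hp
          subst hzs; simp [← hlen]
        rw [List.take_append_of_le_length hple, PySem.Set.ofList_append_singleton]
        by_cases hy : y ∈ zs
        · rw [PySem.Set.add_of_mem ((PySem.Set.mem_ofList _ _).mpr hy)]
          exact ih p hp
        · rw [PySem.Set.add_of_not_mem (fun h => hy ((PySem.Set.mem_ofList _ _).mp h)),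
            idxDict_append,
            PySem.Dict.getD_insert_of_ne _ _ _ (fun h : s = y => hy (h ▸ hs))]
          exact ih p hp
      · have hsy : s = y := by
          have hmem : s ∈ zs ++ [y] := by
            have := (PySem.List.index?_isSome_iff (zs ++ [y]) s).mp (by rw [hp]; rfl)
            exact this
          rcases List.mem_append.mp hmem with h | h
          · exact absurd h hs
          · simpa using h
        subst hsy
        rw [PySem.List.index?_append_singleton_self zs s hs] at hp
        have hpz : p = zs.length := by injection hp with h; omega
        subst hpz
        rw [List.take_left, PySem.Set.ofList_append_singleton,
          PySem.Set.add_of_not_mem (fun h => hs ((PySem.Set.mem_ofList _ _).mp h)),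
          idxDict_append, PySem.Dict.getD_insert_self]

-- ===== VERDICT (by name: the statement is the Claim_ definition above) =====
theorem group_by_smiles_spec : Claim_equal_group_by_smiles := by
  intro smiles _
  show group_by_smiles smiles = group_by_smiles_alt smiles
  have h0 : (PySem.Dict.empty : PySem.Dict String Int) = idxDict [] := rfl
  rw [groupA_eq, h0, loopA_inv smiles [] [] List.nodup_nil]
  simp only [PySem.Set.update_nil_left, List.nil_append]
  unfold group_by_smiles_alt
  apply List.map_congr_left
  intro s hs
  obtain ⟨p, hp⟩ : ∃ p, PySem.List.index? smiles s = some p := by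
    have := (PySem.List.index?_isSome_iff smiles s).mpr hs
    exact Option.isSome_iff_exists.mp this
  rw [hp]
  show (idxDict (PySem.Set.ofList smiles)).getD s 0
      = PySem.Set.len (PySem.Set.ofList (PySem.List.slice smiles none (some (p : Int))))
  have hsl : PySem.List.slice smiles none (some (p : Int)) = smiles.take p :=
    PySem.List.slice_to_natCast smiles p
  rw [hsl, getD_idxDict_ofList smiles s p hp]
  simp [PySem.Set.len]
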